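-- pv_equiv track=rewrite | github.com/Lep333/adventofcode2024 | src/day21.py | partition_start_str
-- ===== SOURCE A (Python) =====
-- def partition_start_str(path_str: str) -> dict:
--     partitions = dict()
--     prev = 0
--     for n, char in enumerate(path_str):
--         if char == "A":
--             key = path_str[prev:n + 1]
--             if partitions.get(key):
--                 partitions[key] += 1
--             else:
--                 partitions[key] = 1
--             prev = n + 1
--     return partitions
-- ===== SOURCE B (Python) =====
-- def partition_start_str(path_str: str) -> dict:
--     # tokenize: every maximal run ending in 'A' (trailing tail without 'A' is dropped), then tally
--     segments = [part + "A" for part in path_str.split("A")[:-1]]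
--     counts = {}
--     for seg in segments:
--         counts[seg] = counts.get(seg, 0) + 1
--     return counts
-- ===== Notes on version B (the rewrite author's own statement) =====
-- stated objective: simpler
-- what changed: B replaces A's per-character scan with a prev-index, per-segment slicing and a truthiness-guarded dict update by a tokenize-then-count decomposition: split on the terminator, re-append it, and tally the segments in one counting loop.
import Mathlib
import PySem

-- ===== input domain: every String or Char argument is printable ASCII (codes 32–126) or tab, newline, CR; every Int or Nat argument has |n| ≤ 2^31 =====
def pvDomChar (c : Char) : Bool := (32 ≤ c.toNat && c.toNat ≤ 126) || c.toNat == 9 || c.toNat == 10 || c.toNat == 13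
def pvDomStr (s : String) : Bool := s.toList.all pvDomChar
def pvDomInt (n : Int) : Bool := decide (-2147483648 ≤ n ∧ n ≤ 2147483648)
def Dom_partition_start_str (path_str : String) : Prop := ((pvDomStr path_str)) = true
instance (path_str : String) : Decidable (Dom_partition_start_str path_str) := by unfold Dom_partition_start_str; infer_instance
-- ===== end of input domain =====

-- B replaces A's per-character scan (prev index + slice + truthiness-guarded dict update)
-- by a tokenize-then-count decomposition: split on 'A', re-append the terminator, tally.


-- ===== PORT A =====
-- the dict update under `if partitions.get(key): … else …` (truthiness of .get)
def pvUpdA (d : PySem.Dict String Int) (key : String) : PySem.Dict String Int :=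
  match d.get? key with
  | some v => if v ≠ 0 then d.insert key (v + 1) else d.insert key 1
  | none => d.insert key 1

-- the body of `for n, char in enumerate(path_str)`; state = (partitions, prev)
def pvStepA (cs : List Char) (st : PySem.Dict String Int × Int) (p : Int × Char) :
    PySem.Dict String Int × Int :=
  if p.2 = 'A' then
    (pvUpdA st.1 (String.ofList (PySem.List.slice cs (some st.2) (some (p.1 + 1)))), p.1 + 1)
  else st

def partition_start_str (path_str : String) : List (String × Int) :=
  let cs := path_str.toList
  ((PySem.List.enumerate cs 0).foldl (pvStepA cs) (PySem.Dict.empty, 0)).1.items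

-- ===== PORT B =====
def partition_start_str_alt (path_str : String) : List (String × Int) :=
  let parts := PySem.Chars.splitOn path_str.toList ['A']
  let segments := (PySem.List.slice parts none (some (-1))).map
    (fun p => String.ofList (p ++ ['A']))
  (segments.foldl (fun d seg => d.insert seg (d.getD seg 0 + 1)) PySem.Dict.empty).items

-- ===== PRECONDITION & SPEC =====
def Spec_partition_start_str (path_str : String) (out : List (String × Int)) : Prop := out = partition_start_str_alt path_str
instance (path_str : String) (out : List (String × Int)) : Decidable (Spec_partition_start_str path_str out) := by unfold Spec_partition_start_str; infer_instance

-- ===== CLAIM (what is proved, stated in full; the proofs are below) =====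
def Claim_equal_partition_start_str : Prop := ∀ (path_str : String), Dom_partition_start_str path_str → Spec_partition_start_str path_str (partition_start_str path_str)

-- ===== LEMMAS AND PROOFS =====

-- the tail of the split, with `cur` the (reversed) pending chunk — mirrors splitOn.go
def pvSplit1 : List Char → List Char → List (List Char)
  | cur, [] => [cur.reverse]
  | cur, c :: rest => if c = 'A' then cur.reverse :: pvSplit1 [] rest else pvSplit1 (c :: cur) rest

-- the 'A'-terminated segments of l, with reversed pending chunk cur
def pvSegs : List Char → List Char → List (List Char)
  | _, [] => []
  | cur, c :: rest =>
    if c = 'A' then (cur.reverse ++ ['A']) :: pvSegs [] rest else pvSegs (c :: cur) rest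

theorem pvGo_eq (l : List Char) : ∀ (fuel : Nat) (cur : List Char) (acc : List (List Char)),
    l.length ≤ fuel →
    PySem.Chars.splitOn.go ['A'] fuel l cur acc = acc.reverse ++ pvSplit1 cur l := by
  induction l with
  | nil =>
    intro fuel cur acc _
    cases fuel <;> simp [PySem.Chars.splitOn.go, pvSplit1]
  | cons c rest ih =>
    intro fuel cur acc hf
    cases fuel with
    | zero => simp at hf
    | succ f =>
      simp only [PySem.Chars.splitOn.go]
      by_cases hc : c = 'A'
      · subst hc
        rw [if_pos (by simp [List.isPrefixOf])]
        rw [show List.drop ['A'].length ('A' :: rest) = rest from rfl]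
        rw [ih f [] (cur.reverse :: acc) (by simpa using Nat.le_of_succ_le_succ hf)]
        simp [pvSplit1]
      · have hpf : (['A'].isPrefixOf (c :: rest)) = false := by
          simp [List.isPrefixOf]
          exact fun h => (hc h.symm).elim
        rw [if_neg (by simp [hpf])]
        rw [ih f (c :: cur) acc (by simpa using Nat.le_of_succ_le_succ hf)]
        simp [pvSplit1, hc]

theorem pvSplitOn_eq (cs : List Char) :
    PySem.Chars.splitOn cs ['A'] = pvSplit1 [] cs := by
  unfold PySem.Chars.splitOn
  rw [pvGo_eq cs (cs.length + 1) [] [] (by omega)]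
  simp

theorem pvSplit1_ne_nil : ∀ (l cur : List Char), pvSplit1 cur l ≠ [] := by
  intro l
  induction l with
  | nil => intro cur; simp [pvSplit1]
  | cons c rest ih => intro cur; by_cases hc : c = 'A' <;> simp [pvSplit1, hc, ih]

theorem pvSegs_eq_split1 : ∀ (l cur : List Char),
    (pvSplit1 cur l).dropLast.map (fun p => p ++ ['A']) = pvSegs cur l := by
  intro l
  induction l with
  | nil => intro cur; simp [pvSplit1, pvSegs]
  | cons c rest ih =>
    intro cur
    by_cases hc : c = 'A'
    · subst hc
      simp [pvSplit1, pvSegs,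
        List.dropLast_cons_of_ne_nil (pvSplit1_ne_nil rest []), ih]
    · simp [pvSplit1, pvSegs, hc, ih]

-- the B-side counting step
def pvStepB (d : PySem.Dict String Int) (seg : String) : PySem.Dict String Int :=
  d.insert seg (d.getD seg 0 + 1)

theorem pvFold_updA_eq_stepB : ∀ (l : List String) (d : PySem.Dict String Int),
    (∀ k v, d.get? k = some v → 0 < v) →
    l.foldl pvUpdA d = l.foldl pvStepB d := by
  intro l
  induction l with
  | nil => intro d _; rfl
  | cons k rest ih =>
    intro d hpos
    have hstep : pvUpdA d k = pvStepB d k := by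
      unfold pvUpdA pvStepB
      cases h : d.get? k with
      | none => rw [PySem.Dict.getD_of_get?_eq_none d 0 h]; simp
      | some v =>
        have hv := hpos k v h
        rw [PySem.Dict.getD_of_get?_eq_some d 0 h]
        have hv' : v ≠ 0 := by omega
        simp [hv']
    have hpres : ∀ k' v', (pvStepB d k).get? k' = some v' → 0 < v' := by
      intro k' v' h'
      unfold pvStepB at h'
      rw [PySem.Dict.get?_insert] at h'
      by_cases he : k' = k
      · rw [if_pos he] at h'
        cases hg : d.get? k with
        | none =>
          rw [PySem.Dict.getD_of_get?_eq_none d 0 hg] at h'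
          simp at h'; omega
        | some v =>
          have := hpos k v hg
          rw [PySem.Dict.getD_of_get?_eq_some d 0 hg] at h'
          simp at h'; omega
      · rw [if_neg he] at h'; exact hpos k' v' h'
    simp only [List.foldl_cons, hstep]
    exact ih (pvStepB d k) hpres

-- A's loop over the suffix `rest`, with `done` the consumed prefix up to prev and
-- `cur` the (reversed) pending chars since prev, counts exactly the segments pvSegs cur rest.
theorem pvLoopA (cs : List Char) :
    ∀ (rest cur done : List Char) (d : PySem.Dict String Int),
    cs = done ++ cur.reverse ++ rest →
    ((PySem.List.enumerate rest ((done.length : Int) + cur.length)).foldl (pvStepA cs)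
        (d, (done.length : Int))).1
      = ((pvSegs cur rest).map (fun p => String.ofList p)).foldl pvUpdA d := by
  intro rest
  induction rest with
  | nil => intro cur done d _; simp [pvSegs]
  | cons c rest' ih =>
    intro cur done d hcs
    rw [PySem.List.enumerate_cons]
    simp only [List.foldl_cons]
    by_cases hc : c = 'A'
    · subst hc
      have hslice : PySem.List.slice cs (some (done.length : Int))
          (some ((done.length : Int) + cur.length + 1)) = cur.reverse ++ ['A'] := by
        have h1 : ((done.length : Int) + cur.length + 1)
            = ((done.length + cur.length + 1 : Nat) : Int) := by push_cast; ring
        rw [h1, PySem.List.slice_natCast, hcs]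
        rw [show done ++ cur.reverse ++ 'A' :: rest'
              = done ++ (((cur.reverse ++ ['A']) ++ rest') : List Char) by simp]
        rw [List.drop_left]
        rw [show done.length + cur.length + 1 - done.length = cur.length + 1 by omega]
        rw [List.take_append_of_le_length (by simp)]
        simp
      have hstep : pvStepA cs (d, (done.length : Int)) (((done.length : Int) + cur.length), 'A')
          = (pvUpdA d (String.ofList (cur.reverse ++ ['A'])),
             (done.length : Int) + cur.length + 1) := by
        simp [pvStepA, hslice]
      rw [hstep]
      have hih := ih [] (done ++ cur.reverse ++ ['A'])
        (pvUpdA d (String.ofList (cur.reverse ++ ['A']))) (by simp [hcs])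
      have hlen : (((done ++ cur.reverse ++ ['A']).length : Int))
          = (done.length : Int) + cur.length + 1 := by simp; ring
      rw [hlen] at hih
      simp only [List.length_nil, Nat.cast_zero, add_zero] at hih
      rw [hih]
      simp [pvSegs]
    · have hstep : pvStepA cs (d, (done.length : Int)) (((done.length : Int) + cur.length), c)
          = (d, (done.length : Int)) := by
        simp [pvStepA, hc]
      rw [hstep]
      have hih := ih (c :: cur) done d (by simp [hcs])
      simp only [List.length_cons] at hih
      rw [show (done.length : Int) + cur.length + 1
            = (done.length : Int) + ((cur.length + 1 : Nat) : Int) by push_cast; ring]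
      rw [hih]
      simp [pvSegs, hc]

theorem pvEmpty_pos : ∀ (k : String) (v : Int),
    (PySem.Dict.empty : PySem.Dict String Int).get? k = some v → 0 < v := by
  intro k v h
  rw [PySem.Dict.get?_empty] at h
  exact absurd h (by simp)

-- ===== VERDICT (by name: the statement is the Claim_ definition above) =====
theorem partition_start_str_spec : Claim_equal_partition_start_str := by
  intro s _
  unfold Spec_partition_start_str partition_start_str partition_start_str_alt
  show (List.foldl (pvStepA s.toList) (PySem.Dict.empty, 0) (PySem.List.enumerate s.toList 0)).1.items
      = (List.foldl (fun d seg => d.insert seg (d.getD seg 0 + 1)) PySem.Dict.empty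
          (List.map (fun p => String.ofList (p ++ ['A']))
            (PySem.List.slice (PySem.Chars.splitOn s.toList ['A']) none (some (-1))))).items
  apply congrArg PySem.Dict.items
  have hA := pvLoopA s.toList s.toList [] [] PySem.Dict.empty (by simp)
  simp only [List.length_nil, Nat.cast_zero, add_zero] at hA
  rw [hA]
  rw [pvFold_updA_eq_stepB _ _ pvEmpty_pos]
  rw [pvSplitOn_eq, PySem.List.slice_to_neg_one]
  rw [show (fun p : List Char => String.ofList (p ++ ['A']))
        = (fun p : List Char => String.ofList p) ∘ (fun p => p ++ ['A']) from rfl]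
  rw [← List.map_map, pvSegs_eq_split1]
  rfl
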